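-- pv_equiv track=rewrite | github.com/div5yesh/advent-of-code | 2024/14/solution.py | viz
-- ===== SOURCE A (Python) =====
-- def viz(locations, r, c, fill=None):
--     output = ""
--     for i in range(r):
--         temp = ""
--         for j in range(c):
--             if (i,j) in locations: temp += fill if fill else str(locations[(i,j)])
--             else: temp += "."
--         output += temp + "\n"
--     return output
-- ===== SOURCE B (Python) =====
-- def viz(locations, r, c, fill=None):
--     grid = [["."] * c for _ in range(r)]
--     for (i, j), value in locations.items():
--         if 0 <= i < r and 0 <= j < c:
--             grid[i][j] = fill if fill else str(value)
--     return "".join("".join(row) + "\n" for row in grid)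
-- ===== Notes on version B (the rewrite author's own statement) =====
-- stated objective: faster
-- what changed: B pre-fills an r x c grid of '.' and scatters only the dict's in-range entries into it, then joins rows, instead of A's per-cell dict membership test and repeated string concatenation.
import Mathlib
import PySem

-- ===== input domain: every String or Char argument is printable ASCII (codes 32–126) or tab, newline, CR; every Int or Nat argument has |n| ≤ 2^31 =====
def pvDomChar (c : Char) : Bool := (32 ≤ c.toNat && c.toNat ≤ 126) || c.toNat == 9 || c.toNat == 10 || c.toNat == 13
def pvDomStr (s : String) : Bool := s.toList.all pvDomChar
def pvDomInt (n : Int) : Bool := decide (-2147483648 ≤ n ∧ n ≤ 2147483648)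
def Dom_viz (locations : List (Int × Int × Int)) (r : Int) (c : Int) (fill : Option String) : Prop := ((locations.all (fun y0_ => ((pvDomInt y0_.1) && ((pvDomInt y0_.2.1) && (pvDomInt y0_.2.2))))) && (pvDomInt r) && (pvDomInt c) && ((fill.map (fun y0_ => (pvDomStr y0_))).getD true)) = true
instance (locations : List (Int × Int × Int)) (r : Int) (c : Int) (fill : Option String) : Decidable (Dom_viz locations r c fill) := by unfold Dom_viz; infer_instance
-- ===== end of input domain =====

-- B scatters the dict's in-range entries into a pre-filled '.' grid and joins the rows,
-- instead of A's per-cell dict lookup with repeated string concatenation (objective: faster).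

-- ===== PORT A =====
-- the dict argument, marshalled once to PySem.Dict (the Python caller's dict; duplicate keys in
-- the triple list behave like dict(pairs): last value wins).  Used by both ports' transliterations.
def vizDict (locations : List (Int × Int × Int)) : PySem.Dict (Int × Int) Int :=
  PySem.Dict.ofList (locations.map (fun t => ((t.1, t.2.1), t.2.2)))

-- the expression 'fill if fill else str(v)' (falsy fill = None or ""), identical in both Pythons
def vizFillStr (fill : Option String) (v : Int) : String :=
  match fill with
  | some s => if s = "" then PySem.Int.toStr v else s
  | none => PySem.Int.toStr v

-- 'locations[(i,j)]' is evaluated only under the '(i,j) in locations' guard, so getD is exact here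
def viz (locations : List (Int × Int × Int)) (r : Int) (c : Int) (fill : Option String) : String :=
  (PySem.List.pyRange 0 r 1).foldl (fun output i =>
    output ++
      ((PySem.List.pyRange 0 c 1).foldl (fun temp j =>
          if (vizDict locations).contains (i, j) then
            temp ++ vizFillStr fill ((vizDict locations).getD (i, j) 0)
          else
            temp ++ ".") "")
      ++ "\n") ""

-- ===== PORT B =====
-- one scatter step: 'if 0 <= i < r and 0 <= j < c: grid[i][j] = fill if fill else str(value)'
def vizStep (r : Int) (c : Int) (fill : Option String)
    (g : List (List String)) (p : (Int × Int) × Int) : List (List String) :=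
  if 0 ≤ p.1.1 ∧ p.1.1 < r ∧ 0 ≤ p.1.2 ∧ p.1.2 < c then
    g.modify p.1.1.toNat (fun row => row.set p.1.2.toNat (vizFillStr fill p.2))
  else g

def viz_alt (locations : List (Int × Int × Int)) (r : Int) (c : Int) (fill : Option String) : String :=
  -- grid = [["."] * c for _ in range(r)], then the scatter loop, then the row join
  (((vizDict locations).items.foldl (vizStep r c fill)
      (List.replicate r.toNat (List.replicate c.toNat "."))).foldl
    (fun out row => out ++ PySem.Str.join "" row ++ "\n") "")

-- ===== PRECONDITION & SPEC =====
def Spec_viz (locations : List (Int × Int × Int)) (r : Int) (c : Int) (fill : Option String) (out : String) : Prop := out = viz_alt locations r c fill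
instance (locations : List (Int × Int × Int)) (r : Int) (c : Int) (fill : Option String) (out : String) : Decidable (Spec_viz locations r c fill out) := by unfold Spec_viz; infer_instance

-- ===== CLAIM (what is proved, stated in full; the proofs are below) =====
def Claim_equal_viz : Prop := ∀ (locations : List (Int × Int × Int)) (r : Int) (c : Int) (fill : Option String), Dom_viz locations r c fill → Spec_viz locations r c fill (viz locations r c fill)

-- ===== LEMMAS AND PROOFS =====

-- the character(s) both programs print at cell (i, j)
def vizCell (locations : List (Int × Int × Int)) (fill : Option String) (i j : Int) : String :=
  match (vizDict locations).get? (i, j) with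
  | some v => vizFillStr fill v
  | none => "."

-- the canonical common form both ports are reduced to
def vizCanon (locations : List (Int × Int × Int)) (r : Int) (c : Int) (fill : Option String) : String :=
  (List.range r.toNat).foldl (fun out (a : Nat) =>
    out ++ PySem.Str.join "" ((List.range c.toNat).map (fun (b : Nat) => vizCell locations fill (a : Int) (b : Int))) ++ "\n") ""

lemma vizCell_eq_branch (locations : List (Int × Int × Int)) (fill : Option String) (i j : Int) :
    (if (vizDict locations).contains (i, j) then
       vizFillStr fill ((vizDict locations).getD (i, j) 0)
     else ".") = vizCell locations fill i j := by
  cases h : (vizDict locations).get? (i, j) <;>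
    simp [vizCell, PySem.Dict.contains_eq_isSome_get?, PySem.Dict.getD_eq_get?_getD, h]

lemma vizJoin_cons (s : String) (xs : List String) :
    PySem.Str.join "" (s :: xs) = s ++ PySem.Str.join "" xs := by
  apply String.toList_inj.mp
  simp [PySem.Str.toList_join, String.toList_append]
  cases xs <;> simp [PySem.Chars.join, List.intercalate]

lemma vizFoldStr {α : Type} (l : List α) (f : α → String) (t : String) :
    l.foldl (fun acc x => acc ++ f x) t = t ++ PySem.Str.join "" (l.map f) := by
  induction l generalizing t with
  | nil => simp [PySem.Str.join, PySem.Chars.join, List.intercalate]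
  | cons x xs ih => simp [ih, vizJoin_cons, String.append_assoc]

-- A reduced to the canonical form
lemma viz_eq_canon (locations : List (Int × Int × Int)) (r : Int) (c : Int) (fill : Option String) :
    viz locations r c fill = vizCanon locations r c fill := by
  unfold viz vizCanon
  conv_lhs => simp only [PySem.List.pyRange_one, Int.sub_zero, List.foldl_map, zero_add]
  apply List.foldl_ext
  intro out a _
  congr 2
  have hbranch : ∀ (t : String) (j : Int),
      (if (vizDict locations).contains ((a : Int), j) then
         t ++ vizFillStr fill ((vizDict locations).getD ((a : Int), j) 0)
       else t ++ ".") =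
      t ++ vizCell locations fill (a : Int) j := by
    intro t j
    rw [← vizCell_eq_branch]
    split <;> rfl
  calc (List.range c.toNat).foldl (fun temp (k : Nat) =>
          if (vizDict locations).contains ((a : Int), (k : Int)) then
            temp ++ vizFillStr fill ((vizDict locations).getD ((a : Int), (k : Int)) 0)
          else temp ++ ".") ""
      = (List.range c.toNat).foldl (fun temp (k : Nat) => temp ++ vizCell locations fill (a : Int) (k : Int)) "" := by
        apply List.foldl_ext; intro t k _; exact hbranch t k
    _ = _ := by rw [vizFoldStr]; simp

-- get? of a nodup-keyed dict is first match on its items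
lemma vizDict_get?_eq_find? (d : PySem.Dict (Int × Int) Int) (hnd : d.keys.Nodup)
    (k : Int × Int) :
    d.get? k = (d.items.find? (fun p => p.1 == k)).map Prod.snd := by
  cases h : d.items.find? (fun p => p.1 == k) with
  | none =>
      rw [List.find?_eq_none] at h
      simp only [Option.map_none]
      rw [PySem.Dict.get?_eq_none_iff_not_mem_keys]
      intro hk
      simp only [PySem.Dict.keys, List.mem_map] at hk
      obtain ⟨p, hp, hpk⟩ := hk
      exact absurd (by simp [hpk]) (h p hp)
  | some p =>
      have hpk : p.1 = k := by simpa using List.find?_some h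
      have hpm : p ∈ d.items := List.mem_of_find?_eq_some h
      have : (k, p.2) ∈ d.items := by rw [← hpk]; exact hpm
      simp [((PySem.Dict.get?_eq_some_iff_mem_items d k p.2 hnd).mpr this)]

lemma vizStep_length (r c : Int) (fill : Option String) (g : List (List String)) (p : (Int × Int) × Int) :
    (vizStep r c fill g p).length = g.length := by
  unfold vizStep; split
  · exact List.length_modify ..
  · rfl

lemma vizStep_rowlen (r c : Int) (fill : Option String) (g : List (List String)) (p : (Int × Int) × Int)
    (i : Nat) : ((vizStep r c fill g p)[i]?.getD []).length = (g[i]?.getD []).length := by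
  unfold vizStep; split
  · rw [List.getElem?_modify]
    cases h : g[i]?
    · simp
    · simp only [Option.getD_some]
      split <;> simp
  · rfl

lemma vizScatter_length (r c : Int) (fill : Option String)
    (ps : List ((Int × Int) × Int)) (g : List (List String)) :
    (ps.foldl (vizStep r c fill) g).length = g.length := by
  induction ps generalizing g with
  | nil => rfl
  | cons p ps ih => simp only [List.foldl_cons]; rw [ih, vizStep_length]

lemma vizScatter_rowlen (r c : Int) (fill : Option String)
    (ps : List ((Int × Int) × Int)) (g : List (List String)) (a : Nat) :
    ((ps.foldl (vizStep r c fill) g)[a]?.getD []).length = (g[a]?.getD []).length := by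
  induction ps generalizing g with
  | nil => rfl
  | cons p ps ih => simp only [List.foldl_cons]; rw [ih, vizStep_rowlen]

-- the heart: after scattering, cell (a, b) holds the rendering of the first matching item
lemma vizScatter_cell (r c : Int) (fill : Option String)
    (ps : List ((Int × Int) × Int)) (hnd : (ps.map Prod.fst).Nodup)
    (g : List (List String)) (hg : g.length = r.toNat)
    (hrow' : ∀ i, i < g.length → (g[i]?.getD []).length = c.toNat)
    (a b : Nat) (ha : (a : Int) < r) (hb : (b : Int) < c) :
    (((ps.foldl (vizStep r c fill) g)[a]?.getD [])[b]?.getD ".") =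
      match ps.find? (fun p => p.1 == ((a : Int), (b : Int))) with
      | some p => vizFillStr fill p.2
      | none => (g[a]?.getD [])[b]?.getD "." := by
  induction ps generalizing g with
  | nil => simp
  | cons p ps ih =>
      simp only [List.map_cons, List.nodup_cons] at hnd
      obtain ⟨hp1, hnd⟩ := hnd
      have ha' : a < g.length := by rw [hg]; omega
      have hrowlen : (g[a]?.getD []).length = c.toNat := hrow' a ha'
      have hb' : b < c.toNat := by omega
      simp only [List.foldl_cons, List.find?_cons]
      have hgl : (vizStep r c fill g p).length = r.toNat := by rw [vizStep_length, hg]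
      have hgr : ∀ i, i < (vizStep r c fill g p).length → ((vizStep r c fill g p)[i]?.getD []).length = c.toNat := by
        intro i hi
        rw [vizStep_rowlen]
        exact hrow' i (by rwa [vizStep_length] at hi)
      rw [ih hnd _ hgl hgr]
      by_cases hk : p.1 = ((a : Int), (b : Int))
      · -- head matches: the rest cannot, and the step wrote exactly this cell
        have hfind : ps.find? (fun q => q.1 == ((a : Int), (b : Int))) = none := by
          rw [List.find?_eq_none]
          intro q hq
          simp only [beq_iff_eq]
          intro hqk
          exact hp1 (by rw [← hk, ← hqk] at *; exact List.mem_map_of_mem hq)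
        rw [hfind]
        simp only [hk, beq_self_eq_true]
        have hcond : 0 ≤ p.1.1 ∧ p.1.1 < r ∧ 0 ≤ p.1.2 ∧ p.1.2 < c := by
          rw [hk]; exact ⟨Int.natCast_nonneg a, ha, Int.natCast_nonneg b, hb⟩
        unfold vizStep
        rw [if_pos hcond, List.getElem?_modify]
        have h1 : p.1.1.toNat = a := by rw [hk]; simp
        have h2 : p.1.2.toNat = b := by rw [hk]; simp
        cases hga : g[a]? with
        | none => simp [List.getElem?_eq_getElem ha'] at hga
        | some row =>
            have hrl : row.length = c.toNat := by simpa [hga] using hrowlen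
            simp [h1, h2, hrl, hb']
      · -- head misses: the step leaves cell (a, b) unchanged
        have hkb : (p.1 == ((a : Int), (b : Int))) = false := by simpa using hk
        rw [hkb]
        cases hfind : ps.find? (fun q => q.1 == ((a : Int), (b : Int))) with
        | some q => rfl
        | none =>
            simp only []
            unfold vizStep
            split
            · rename_i hcond
              rw [List.getElem?_modify]
              by_cases hia : p.1.1.toNat = a
              · have hp11 : p.1.1 = (a : Int) := by omega
                have hp12 : p.1.2 ≠ (b : Int) := by
                  intro h12
                  exact hk (by rw [← hp11, ← h12])
                have hjb : p.1.2.toNat ≠ b := by omega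
                cases hga : g[a]? with
                | none => simp
                | some row => simp [hia, hjb]
              · cases hga : g[a]? <;> simp [hia]
            · rfl

-- B reduced to the canonical form
lemma viz_alt_eq_canon (locations : List (Int × Int × Int)) (r : Int) (c : Int) (fill : Option String) :
    viz_alt locations r c fill = vizCanon locations r c fill := by
  unfold viz_alt vizCanon
  have hnd : ((vizDict locations).items.map Prod.fst).Nodup :=
    PySem.Dict.nodup_keys_ofList _
  have hg0 : (List.replicate r.toNat (List.replicate c.toNat ("." : String))).length = r.toNat :=
    List.length_replicate
  have hrow0 : ∀ i, i < (List.replicate r.toNat (List.replicate c.toNat ("." : String))).length →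
      ((List.replicate r.toNat (List.replicate c.toNat ("." : String)))[i]?.getD []).length = c.toNat := by
    intro i hi
    rw [List.length_replicate] at hi
    simp [hi]
  have hgrid : (vizDict locations).items.foldl (vizStep r c fill)
        (List.replicate r.toNat (List.replicate c.toNat "."))
      = (List.range r.toNat).map (fun (a : Nat) => (List.range c.toNat).map (fun (b : Nat) => vizCell locations fill (a : Int) (b : Int))) := by
    apply List.ext_getElem?
    intro a
    by_cases ha : a < r.toNat
    · have hlen : ((vizDict locations).items.foldl (vizStep r c fill)
            (List.replicate r.toNat (List.replicate c.toNat "."))).length = r.toNat := by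
        rw [vizScatter_length, List.length_replicate]
      have hsome : ∃ row, ((vizDict locations).items.foldl (vizStep r c fill)
            (List.replicate r.toNat (List.replicate c.toNat ".")))[a]? = some row := by
        exact ⟨_, List.getElem?_eq_getElem (by omega)⟩
      obtain ⟨row, hrowa⟩ := hsome
      have hrl : row.length = c.toNat := by
        have := vizScatter_rowlen r c fill (vizDict locations).items
          (List.replicate r.toNat (List.replicate c.toNat ".")) a
        rw [hrowa] at this
        simpa [List.getElem?_replicate, ha] using this
      rw [hrowa, List.getElem?_map, List.getElem?_range ha]
      simp only [Option.map_some]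
      congr 1
      apply List.ext_getElem?
      intro b
      by_cases hbc : b < c.toNat
      · have hcell := vizScatter_cell r c fill (vizDict locations).items hnd
          (List.replicate r.toNat (List.replicate c.toNat ".")) hg0 hrow0 a b
          (by omega) (by omega)
        rw [hrowa] at hcell
        simp only [Option.getD_some] at hcell
        rw [List.getElem?_replicate, if_pos ha] at hcell
        simp only [Option.getD_some] at hcell
        rw [List.getElem?_replicate, if_pos hbc, Option.getD_some] at hcell
        have hbrow : row[b]? = some (row[b]?.getD ".") := by
          rw [List.getElem?_eq_getElem (by omega : b < row.length)]
          rfl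
        rw [hbrow, List.getElem?_map, List.getElem?_range hbc]
        simp only [Option.map_some, Option.some.injEq]
        rw [hcell]
        have hndk : (vizDict locations).keys.Nodup := PySem.Dict.nodup_keys_ofList _
        unfold vizCell
        rw [vizDict_get?_eq_find? (vizDict locations) hndk ((a : Int), (b : Int))]
        cases hq : (vizDict locations).items.find? (fun p => p.1 == ((a : Int), (b : Int))) <;> simp
      · rw [List.getElem?_eq_none_iff.mpr (by omega : row.length ≤ b)]
        rw [List.getElem?_eq_none_iff.mpr (by simp; omega)]
    · rw [List.getElem?_eq_none_iff.mpr (by rw [vizScatter_length, List.length_replicate]; omega)]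
      rw [List.getElem?_eq_none_iff.mpr (by simp; omega)]
  rw [hgrid, List.foldl_map]

-- ===== VERDICT (by name: the statement is the Claim_ definition above) =====
theorem viz_spec : Claim_equal_viz := by
  intro locations r c fill _
  unfold Spec_viz
  rw [viz_eq_canon, viz_alt_eq_canon]
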